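-- pv_equiv track=rewrite | github.com/ECUFuzz/ECUFuzz | Fuzzing_engine/spitest/smi8reg_parsed.py | merge_fields
-- ===== SOURCE A (Python) =====
-- def merge_fields(data):
--     for instruction in data.values():
--         for direction in ['MOSI', 'MISO']:
--             if direction in instruction:
--                 merged = {}
--                 to_merge = {
--                     'CRC': ['CRC0', 'CRC1', 'CRC2'],
--                     'BADR': ['BADR0', 'BADR1', 'BADR2', 'BADR3', 'BADR4'],
--                     'ADR': ['ADR0', 'ADR1', 'ADR2', 'ADR3'],
--                     'CAP': ['CAP0', 'CAP1', 'CAP2'],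
--                     'TRI': ['TRI0', 'TRI1', 'TRI2', 'TRI3', 'TRI4'],
--                     'SID': ['SID0', 'SID1', 'SID2', 'SID3', 'SID4'],
--                     'D': ['D0', 'D1', 'D2', 'D3', 'D4', 'D5', 'D6', 'D7', 'D8', 'D9', 'D10', 'D11', 'D12', 'D13', 'D14', 'D15'],
--                     'MID': ['MID0', 'MID1', 'MID2'],
--                     'PG': ['PG0', 'PG1', 'PG2']
--                 }
--
--                 for new_key, old_keys in to_merge.items():
--                     present_keys = [k for k in old_keys if k in instruction[direction]]
--                     if present_keys:
--                         start = min(instruction[direction][k][0] for k in present_keys)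
--                         end = max(instruction[direction][k][1] for k in present_keys)
--                         merged[new_key] = [start, end]
--                         for k in present_keys:
--                             instruction[direction].pop(k)
--
--                 instruction[direction].update(merged)
--     return data
-- ===== SOURCE B (Python) =====
-- # B: one index-driven pass per direction using a reverse sub-key -> group map,
-- # instead of A's nested per-group scans over fixed sub-key lists.
--
-- _GROUP_SIZES = {'CRC': 3, 'BADR': 5, 'ADR': 4, 'CAP': 3, 'TRI': 5,
--                 'SID': 5, 'D': 16, 'MID': 3, 'PG': 3}
-- _REV = {g + str(i): g for g, n in _GROUP_SIZES.items() for i in range(n)}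
--
-- def merge_fields(data):
--     for instruction in data.values():
--         for direction in ('MOSI', 'MISO'):
--             d = instruction.get(direction)
--             if d is None:
--                 continue
--             acc = {}
--             for k, v in d.items():
--                 g = _REV.get(k)
--                 if g is not None:
--                     if g in acc:
--                         a = acc[g]
--                         acc[g] = [min(a[0], v[0]), max(a[1], v[1])]
--                     else:
--                         acc[g] = [v[0], v[1]]
--             out = {k: v for k, v in d.items() if k not in _REV}
--             for g in _GROUP_SIZES:
--                 if g in acc:
--                     out[g] = acc[g]
--             instruction[direction] = out
--     return data
-- ===== Notes on version B (the rewrite author's own statement) =====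
-- stated objective: alternative
-- what changed: B inverts the fixed group->sub-keys table into one reverse sub-key->group index and makes a single pass over each direction dict's actual items, accumulating per-group [min,max] and keeping non-mergeable keys by one filter, instead of A's per-group scans over the fixed sub-key lists with repeated membership tests and pops.
-- outside the precondition, e.g. on merge_fields({'i': {'MOSI': {'CRC0': [1]}}}): A raises IndexError, B raises IndexError
import Mathlib
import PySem

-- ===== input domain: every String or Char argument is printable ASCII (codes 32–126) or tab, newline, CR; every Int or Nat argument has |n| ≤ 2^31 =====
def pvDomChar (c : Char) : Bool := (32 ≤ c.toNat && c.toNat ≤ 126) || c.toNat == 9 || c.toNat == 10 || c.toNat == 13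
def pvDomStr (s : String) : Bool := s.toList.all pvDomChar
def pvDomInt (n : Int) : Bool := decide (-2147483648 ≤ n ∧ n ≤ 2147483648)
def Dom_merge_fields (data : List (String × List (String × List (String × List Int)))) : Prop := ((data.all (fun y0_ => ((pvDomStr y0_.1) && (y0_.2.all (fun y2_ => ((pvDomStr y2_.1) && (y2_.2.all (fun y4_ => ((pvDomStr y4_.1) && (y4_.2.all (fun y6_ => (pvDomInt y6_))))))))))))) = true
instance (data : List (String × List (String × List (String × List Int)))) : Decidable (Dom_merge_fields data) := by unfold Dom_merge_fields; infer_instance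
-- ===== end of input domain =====

-- B replaces A's nested per-group scans over fixed sub-key lists by one reverse-index-driven
-- pass over the actual keys of each direction dict (objective: alternative; same result).
-- A mutates its argument in place; the equivalence proved here is about the RETURN value only.

-- ===== PORT A =====
def toMergeA : List (String × List String) :=
  [("CRC", ["CRC0", "CRC1", "CRC2"]),
   ("BADR", ["BADR0", "BADR1", "BADR2", "BADR3", "BADR4"]),
   ("ADR", ["ADR0", "ADR1", "ADR2", "ADR3"]),
   ("CAP", ["CAP0", "CAP1", "CAP2"]),
   ("TRI", ["TRI0", "TRI1", "TRI2", "TRI3", "TRI4"]),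
   ("SID", ["SID0", "SID1", "SID2", "SID3", "SID4"]),
   ("D", ["D0", "D1", "D2", "D3", "D4", "D5", "D6", "D7", "D8", "D9", "D10", "D11", "D12", "D13", "D14", "D15"]),
   ("MID", ["MID0", "MID1", "MID2"]),
   ("PG", ["PG0", "PG1", "PG2"])]

-- the body of A's "for new_key, old_keys in to_merge.items()" loop; state = (direction dict, merged)
def mergeDirAStep (st : PySem.Dict String (List Int) × PySem.Dict String (List Int)) (q : String × List String) :
    PySem.Dict String (List Int) × PySem.Dict String (List Int) :=
  let presentKeys := q.2.filter (fun k => PySem.Dict.contains st.1 k)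
  if presentKeys.isEmpty then st
  else
    let s := (PySem.List.min? (presentKeys.map (fun k => PySem.List.pyGetD (PySem.Dict.getD st.1 k []) 0 0)) (fun y => y)).getD 0
    let e := (PySem.List.max? (presentKeys.map (fun k => PySem.List.pyGetD (PySem.Dict.getD st.1 k []) 1 0)) (fun y => y)).getD 0
    (List.foldl (fun d k => PySem.Dict.erase d k) st.1 presentKeys,
     PySem.Dict.insert st.2 q.1 [s, e])

def mergeDirA (d0 : PySem.Dict String (List Int)) : PySem.Dict String (List Int) :=
  let st := List.foldl mergeDirAStep (d0, PySem.Dict.empty) toMergeA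
  PySem.Dict.update st.1 st.2.items

def mergeInstrA (instr : List (String × List (String × List Int))) : List (String × List (String × List Int)) :=
  (List.foldl
    (fun (ins : PySem.Dict String (List (String × List Int))) dir =>
      match PySem.Dict.get? ins dir with
      | some dd => PySem.Dict.insert ins dir (mergeDirA (PySem.Dict.mk dd)).items
      | none => ins)
    (PySem.Dict.mk instr) ["MOSI", "MISO"]).items

def merge_fields (data : List (String × List (String × List (String × List Int)))) : List (String × List (String × List (String × List Int))) :=
  data.map (fun p => (p.1, mergeInstrA p.2))

-- ===== PORT B =====
def groupSizesB : List (String × Int) :=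
  [("CRC", 3), ("BADR", 5), ("ADR", 4), ("CAP", 3), ("TRI", 5), ("SID", 5), ("D", 16), ("MID", 3), ("PG", 3)]

-- _REV = {g + str(i): g for g, n in _GROUP_SIZES.items() for i in range(n)}
def revB : PySem.Dict String String :=
  PySem.Dict.ofList (groupSizesB.flatMap (fun q => (PySem.List.pyRange 0 q.2 1).map (fun i => (q.1 ++ PySem.Int.toStr i, q.1))))

-- the body of B's "for k, v in d.items()" accumulator loop
def mergeDirBStep (acc : PySem.Dict String (List Int)) (kv : String × List Int) : PySem.Dict String (List Int) :=
  match PySem.Dict.get? revB kv.1 with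
  | none => acc
  | some g =>
    match PySem.Dict.get? acc g with
    | some a => PySem.Dict.insert acc g
        [min (PySem.List.pyGetD a 0 0) (PySem.List.pyGetD kv.2 0 0),
         max (PySem.List.pyGetD a 1 0) (PySem.List.pyGetD kv.2 1 0)]
    | none => PySem.Dict.insert acc g [PySem.List.pyGetD kv.2 0 0, PySem.List.pyGetD kv.2 1 0]

def mergeDirB (d : PySem.Dict String (List Int)) : PySem.Dict String (List Int) :=
  let acc := List.foldl mergeDirBStep PySem.Dict.empty d.items
  -- out = {k: v for k, v in d.items() if k not in _REV}
  let out := PySem.Dict.ofList (d.items.filter (fun kv => !(PySem.Dict.contains revB kv.1)))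
  List.foldl
    (fun out q =>
      match PySem.Dict.get? acc q.1 with
      | some a => PySem.Dict.insert out q.1 a
      | none => out)
    out groupSizesB

def mergeInstrB (instr : List (String × List (String × List Int))) : List (String × List (String × List Int)) :=
  (List.foldl
    (fun (ins : PySem.Dict String (List (String × List Int))) dir =>
      match PySem.Dict.get? ins dir with
      | some dd => PySem.Dict.insert ins dir (mergeDirB (PySem.Dict.mk dd)).items
      | none => ins)
    (PySem.Dict.mk instr) ["MOSI", "MISO"]).items

def merge_fields_alt (data : List (String × List (String × List (String × List Int)))) : List (String × List (String × List (String × List Int))) :=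
  data.map (fun p => (p.1, mergeInstrB p.2))

-- ===== PRECONDITION & SPEC =====
def mergeSubKeysPre : List String :=
  ["CRC0", "CRC1", "CRC2", "BADR0", "BADR1", "BADR2", "BADR3", "BADR4",
   "ADR0", "ADR1", "ADR2", "ADR3", "CAP0", "CAP1", "CAP2",
   "TRI0", "TRI1", "TRI2", "TRI3", "TRI4", "SID0", "SID1", "SID2", "SID3", "SID4",
   "D0", "D1", "D2", "D3", "D4", "D5", "D6", "D7", "D8", "D9", "D10", "D11", "D12", "D13", "D14", "D15",
   "MID0", "MID1", "MID2", "PG0", "PG1", "PG2"]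

-- Pre_ excludes (a) direction dicts in which some mergeable sub-key carries a value list of
-- fewer than 2 entries — Python A raises IndexError there — and (b) MOSI/MISO association
-- lists with duplicate keys, which do not represent a Python dict.
def Pre_merge_fields (data : List (String × List (String × List (String × List Int)))) : Prop :=
  ∀ p ∈ data, ∀ q ∈ p.2, (q.1 = "MOSI" ∨ q.1 = "MISO") →
    (q.2.map Prod.fst).Nodup ∧ ∀ r ∈ q.2, r.1 ∈ mergeSubKeysPre → 2 ≤ r.2.length

instance (data : List (String × List (String × List (String × List Int)))) : Decidable (Pre_merge_fields data) := by
  unfold Pre_merge_fields; infer_instance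

def pvWitness_merge_fields : (List (String × List (String × List (String × List Int)))) :=
  [("i", [("MOSI", [("CRC0", [1, 2]), ("D3", [0, 5]), ("X", [7])])])]

def pvDecEqDeep : DecidableEq (List (String × List (String × List (String × List Int)))) :=
  @instDecidableEqList _ (@instDecidableEqProd _ _ _ (@instDecidableEqList _ (@instDecidableEqProd _ _ _ (@instDecidableEqList _ instDecidableEqProd))))

def Spec_merge_fields (data : List (String × List (String × List (String × List Int)))) (out : List (String × List (String × List (String × List Int)))) : Prop := out = merge_fields_alt data
instance (data : List (String × List (String × List (String × List Int)))) (out : List (String × List (String × List (String × List Int)))) : Decidable (Spec_merge_fields data out) := by unfold Spec_merge_fields; exact pvDecEqDeep _ _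

-- ===== CLAIM (what is proved, stated in full; the proofs are below) =====
def Claim_equal_merge_fields : Prop := ∀ (data : List (String × List (String × List (String × List Int)))), Dom_merge_fields data → Pre_merge_fields data → Spec_merge_fields data (merge_fields data)

-- ===== LEMMAS AND PROOFS =====

-- proof-side abbreviations
def pvF0 (v : List Int) : Int := PySem.List.pyGetD v 0 0
def pvF1 (v : List Int) : Int := PySem.List.pyGetD v 1 0

def pvPresent (d : PySem.Dict String (List Int)) (S : List String) : List String :=
  S.filter (fun k => PySem.Dict.contains d k)

def pvMval (d : PySem.Dict String (List Int)) (S : List String) : List Int :=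
  [(PySem.List.min? ((pvPresent d S).map (fun k => PySem.List.pyGetD (PySem.Dict.getD d k []) 0 0)) (fun y => y)).getD 0,
   (PySem.List.max? ((pvPresent d S).map (fun k => PySem.List.pyGetD (PySem.Dict.getD d k []) 1 0)) (fun y => y)).getD 0]

def pvComb (o : Option (List Int)) (v : List Int) : List Int :=
  match o with
  | none => [pvF0 v, pvF1 v]
  | some a => [min (pvF0 a) (pvF0 v), max (pvF1 a) (pvF1 v)]

def pvSubsOf (g : String) : List String := PySem.Dict.getD (PySem.Dict.mk toMergeA) g []

-- concrete facts about the fixed tables, all by computation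
set_option maxRecDepth 8192 in
set_option maxHeartbeats 1000000 in
theorem rev_of_mem : ∀ q ∈ toMergeA, ∀ k ∈ q.2, PySem.Dict.get? revB k = some q.1 := by decide
set_option maxRecDepth 8192 in
set_option maxHeartbeats 1000000 in
theorem rev_keys : PySem.Dict.keys revB = toMergeA.flatMap (fun q => q.2) := by decide
set_option maxRecDepth 8192 in
theorem tm_fst_nodup : (toMergeA.map Prod.fst).Nodup := by decide
set_option maxRecDepth 8192 in
theorem tm_sub_nodup : ∀ q ∈ toMergeA, q.2.Nodup := by decide
set_option maxRecDepth 8192 in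
set_option maxHeartbeats 1000000 in
theorem tm_disj : toMergeA.Pairwise (fun a b => ∀ k ∈ a.2, k ∉ b.2) := by decide
theorem names_eq : groupSizesB.map Prod.fst = toMergeA.map Prod.fst := by decide
set_option maxRecDepth 8192 in
theorem subsOf_eq : ∀ q ∈ toMergeA, pvSubsOf q.1 = q.2 := by decide

theorem keyed_eq {β : Type} {l : List (String × β)} (h : (l.map Prod.fst).Nodup)
    {p q : String × β} (hp : p ∈ l) (hq : q ∈ l) (e : p.1 = q.1) : p = q := by
  induction l with
  | nil => cases hp
  | cons x t ih =>
    simp only [List.map_cons, List.nodup_cons] at h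
    rcases List.mem_cons.1 hp with hp1 | hp2 <;> rcases List.mem_cons.1 hq with hq1 | hq2
    · rw [hp1, hq1]
    · subst hp1
      exact absurd (e ▸ List.mem_map_of_mem (l := t) (f := Prod.fst) hq2) h.1
    · subst hq1
      exact absurd (e ▸ List.mem_map_of_mem (l := t) (f := Prod.fst) hp2) h.1
    · exact ih h.2 hp2 hq2

theorem rev_some_iff {q : String × List String} (hq : q ∈ toMergeA) (k : String) :
    PySem.Dict.get? revB k = some q.1 ↔ k ∈ q.2 := by
  constructor
  · intro h
    have hk : k ∈ PySem.Dict.keys revB := by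
      by_contra hk
      rw [← PySem.Dict.get?_eq_none_iff_not_mem_keys] at hk
      simp [hk] at h
    rw [rev_keys] at hk
    rcases List.mem_flatMap.1 hk with ⟨q', hq', hkq'⟩
    have h' := rev_of_mem q' hq' k hkq'
    have e : q'.1 = q.1 := by rw [h'] at h; exact Option.some.inj h
    have : q' = q := keyed_eq tm_fst_nodup hq' hq e
    exact this ▸ hkq'
  · exact rev_of_mem q hq k

theorem contains_rev (k : String) :
    PySem.Dict.contains revB k = decide (∃ q ∈ toMergeA, k ∈ q.2) := by
  by_cases hex : ∃ q ∈ toMergeA, k ∈ q.2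
  · rcases hex with ⟨q, hq, hk⟩
    have hg := rev_of_mem q hq k hk
    have hdec : decide (∃ q ∈ toMergeA, k ∈ q.2) = true := decide_eq_true ⟨q, hq, hk⟩
    rw [hdec, PySem.Dict.contains_eq_isSome_get?, hg]
    rfl
  · have hk : k ∉ PySem.Dict.keys revB := by
      rw [rev_keys]
      intro hmem
      exact hex (List.mem_flatMap.1 hmem)
    have := (PySem.Dict.get?_eq_none_iff_not_mem_keys revB k).2 hk
    simp [PySem.Dict.contains_eq_isSome_get?, this, hex]

theorem get?_mk_filter (l : List (String × List Int)) (P : String × List Int → Bool) (k : String)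
    (h : ∀ v, P (k, v) = true) :
    PySem.Dict.get? (PySem.Dict.mk (l.filter P)) k = PySem.Dict.get? (PySem.Dict.mk l) k := by
  induction l with
  | nil => rfl
  | cons x t ih =>
    by_cases hP : P x = true
    · rw [List.filter_cons_of_pos hP]
      rw [show (x :: t.filter P) = ((x.1, x.2) :: t.filter P) by simp, PySem.Dict.get?_mk_cons,
          show (x :: t) = ((x.1, x.2) :: t) by simp, PySem.Dict.get?_mk_cons]
      by_cases hx : x.1 == k
      · simp [hx]
      · simp only [hx, Bool.false_eq_true, if_false]; exact ih
    · rw [List.filter_cons_of_neg hP]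
      have hx : (x.1 == k) = false := by
        by_contra hx
        have : x.1 = k := by
          have := eq_true_of_ne_false (fun hf => hx hf)
          exact beq_iff_eq.1 this
        subst this
        exact hP (by simpa using h x.2)
      rw [show (x :: t) = ((x.1, x.2) :: t) by simp, PySem.Dict.get?_mk_cons]
      simp only [hx, Bool.false_eq_true, if_false]
      exact ih

theorem foldl_erase_items (ks : List String) : ∀ (d : PySem.Dict String (List Int)),
    (List.foldl (fun d k => PySem.Dict.erase d k) d ks).items
      = d.items.filter (fun kv => !decide (kv.1 ∈ ks)) := by
  induction ks with
  | nil => intro d; simp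
  | cons k t ih =>
    intro d
    rw [List.foldl_cons, ih]
    show (PySem.Dict.erase d k).items.filter _ = _
    rw [PySem.Dict.erase, List.filter_filter]
    apply List.filter_congr
    intro kv _
    by_cases h1 : kv.1 = k <;> by_cases h2 : kv.1 ∈ t <;> simp [h1, h2]

theorem gvals_perm (items : List (String × List Int)) (hnd : (items.map Prod.fst).Nodup)
    (S : List String) (hS : S.Nodup) :
    ((pvPresent (PySem.Dict.mk items) S).map (fun k => PySem.Dict.getD (PySem.Dict.mk items) k [])).Perm
      ((items.filter (fun kv => decide (kv.1 ∈ S))).map Prod.snd) := by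
  have hkeys : (PySem.Dict.mk items).keys.Nodup := by
    simpa [PySem.Dict.keys] using hnd
  have hmm : ((pvPresent (PySem.Dict.mk items) S).map (fun k => PySem.Dict.getD (PySem.Dict.mk items) k []))
      = ((pvPresent (PySem.Dict.mk items) S).map (fun k => (k, PySem.Dict.getD (PySem.Dict.mk items) k []))).map Prod.snd := by
    rw [List.map_map]; exact List.map_congr_left (fun a _ => rfl)
  rw [hmm]
  apply List.Perm.map
  rw [List.perm_ext_iff_of_nodup]
  · intro a
    constructor
    · intro ha
      rcases List.mem_map.1 ha with ⟨k, hk, rfl⟩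
      rcases List.mem_filter.1 hk with ⟨hkS, hkc⟩
      have hsome : ((PySem.Dict.mk items).get? k).isSome := by
        rw [← PySem.Dict.contains_eq_isSome_get?]; exact hkc
      rcases Option.isSome_iff_exists.1 hsome with ⟨v, hv⟩
      have hgd := PySem.Dict.getD_of_get?_eq_some (PySem.Dict.mk items) ([]) hv
      have hmem := ((PySem.Dict.get?_eq_some_iff_mem_items (PySem.Dict.mk items) k v hkeys).1 hv)
      rw [hgd]
      exact List.mem_filter.2 ⟨hmem, by simpa using hkS⟩
    · intro ha
      rcases List.mem_filter.1 ha with ⟨hmem, haS⟩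
      have hv : (PySem.Dict.mk items).get? a.1 = some a.2 :=
        (PySem.Dict.get?_eq_some_iff_mem_items (PySem.Dict.mk items) a.1 a.2 hkeys).2 (by simpa using hmem)
      have hc : PySem.Dict.contains (PySem.Dict.mk items) a.1 = true := by
        rw [PySem.Dict.contains_eq_isSome_get?, hv]; rfl
      have hk : a.1 ∈ pvPresent (PySem.Dict.mk items) S :=
        List.mem_filter.2 ⟨by simpa using haS, hc⟩
      have hgd := PySem.Dict.getD_of_get?_eq_some (PySem.Dict.mk items) ([]) hv
      have : (a.1, PySem.Dict.getD (PySem.Dict.mk items) a.1 []) = a := by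
        rw [hgd]
      exact this ▸ List.mem_map_of_mem hk
  · exact (hS.filter _).map (fun a b e => congrArg Prod.fst e)
  · exact ((List.Nodup.of_map _ hnd).filter _)

-- fold shapes of Python's min()/max() and their invariance under permutation
def pvMstep (acc : Option Int) (x : Int) : Option Int :=
  match acc with
  | none => some x
  | some m => if x < m then some x else some m

def pvXstep (acc : Option Int) (x : Int) : Option Int :=
  match acc with
  | none => some x
  | some m => if m < x then some x else some m

theorem mstep_some (m x : Int) : pvMstep (some m) x = some (min m x) := by
  simp only [pvMstep]
  split_ifs with h1
  · rw [min_eq_right (le_of_lt h1)]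
  · rw [min_eq_left (by omega)]

theorem xstep_some (m x : Int) : pvXstep (some m) x = some (max m x) := by
  simp only [pvXstep]
  split_ifs with h1
  · rw [max_eq_right (le_of_lt h1)]
  · rw [max_eq_left (by omega)]

theorem mstep_foldl_perm {l l' : List Int} (h : l.Perm l') :
    ∀ acc, List.foldl pvMstep acc l = List.foldl pvMstep acc l' := by
  induction h with
  | nil => intro _; rfl
  | cons x _ ih => intro acc; simp only [List.foldl_cons]; exact ih _
  | swap x y t =>
    intro acc
    simp only [List.foldl_cons]
    congr 1
    rcases acc with _ | m
    · show pvMstep (some y) x = pvMstep (some x) y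
      rw [mstep_some, mstep_some, min_comm]
    · rw [mstep_some, mstep_some, mstep_some, mstep_some, min_right_comm]
  | trans _ _ ih1 ih2 => intro acc; rw [ih1, ih2]

theorem xstep_foldl_perm {l l' : List Int} (h : l.Perm l') :
    ∀ acc, List.foldl pvXstep acc l = List.foldl pvXstep acc l' := by
  induction h with
  | nil => intro _; rfl
  | cons x _ ih => intro acc; simp only [List.foldl_cons]; exact ih _
  | swap x y t =>
    intro acc
    simp only [List.foldl_cons]
    congr 1
    rcases acc with _ | m
    · show pvXstep (some y) x = pvXstep (some x) y
      rw [xstep_some, xstep_some, max_comm]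
    · rw [xstep_some, xstep_some, xstep_some, xstep_some, max_right_comm]
  | trans _ _ ih1 ih2 => intro acc; rw [ih1, ih2]

theorem min?_eq_foldl (l : List Int) :
    PySem.List.min? l (fun y => y) = List.foldl pvMstep none l := by
  unfold PySem.List.min?
  apply PySem.List.foldl_congr_mem
  intro acc x _
  rcases acc with _ | m
  · rfl
  · simp only [pvMstep]

theorem max?_eq_foldl (l : List Int) :
    PySem.List.max? l (fun y => y) = List.foldl pvXstep none l := by
  unfold PySem.List.max?
  apply PySem.List.foldl_congr_mem
  intro acc x _
  rcases acc with _ | m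
  · rfl
  · simp only [pvXstep]

theorem min?_perm {l l' : List Int} (h : l.Perm l') :
    PySem.List.min? l (fun y => y) = PySem.List.min? l' (fun y => y) := by
  rw [min?_eq_foldl, min?_eq_foldl]
  exact mstep_foldl_perm h none

theorem max?_perm {l l' : List Int} (h : l.Perm l') :
    PySem.List.max? l (fun y => y) = PySem.List.max? l' (fun y => y) := by
  rw [max?_eq_foldl, max?_eq_foldl]
  exact xstep_foldl_perm h none

set_option maxRecDepth 65536 in
set_option maxHeartbeats 2000000 in
theorem bstep_eq (acc : PySem.Dict String (List Int)) (kv : String × List Int) :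
    mergeDirBStep acc kv =
      match PySem.Dict.get? revB kv.1 with
      | none => acc
      | some g =>
        match PySem.Dict.get? acc g with
        | some a => PySem.Dict.insert acc g
            [min (PySem.List.pyGetD a 0 0) (PySem.List.pyGetD kv.2 0 0),
             max (PySem.List.pyGetD a 1 0) (PySem.List.pyGetD kv.2 1 0)]
        | none => PySem.Dict.insert acc g [PySem.List.pyGetD kv.2 0 0, PySem.List.pyGetD kv.2 1 0] := rfl

set_option maxRecDepth 65536 in
set_option maxHeartbeats 2000000 in
theorem acc_spec (g : String) : ∀ (items : List (String × List Int)) (acc : PySem.Dict String (List Int)),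
    PySem.Dict.get? (List.foldl mergeDirBStep acc items) g =
      List.foldl (fun o kv => some (pvComb o kv.2)) (PySem.Dict.get? acc g)
        (items.filter (fun kv => PySem.Dict.get? revB kv.1 == some g)) := by
  intro items
  induction items with
  | nil => intro acc; rfl
  | cons kv t ih =>
    intro acc
    rw [List.foldl_cons, List.filter_cons]
    cases hr : PySem.Dict.get? revB kv.1 with
    | none =>
      rw [show ((none : Option String) == some g) = false from rfl]
      simp only [Bool.false_eq_true, if_false]
      have hstep : mergeDirBStep acc kv = acc := by
        rw [bstep_eq, hr]
      rw [hstep, ih]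
    | some g' =>
      by_cases hg : g' = g
      · subst hg
        rw [show ((some g' == some g') : Bool) = true from by simp]
        rw [if_pos rfl, List.foldl_cons, ih]
        congr 1
        cases ha : PySem.Dict.get? acc g' with
        | none =>
          have hstep : mergeDirBStep acc kv
              = PySem.Dict.insert acc g' [PySem.List.pyGetD kv.2 0 0, PySem.List.pyGetD kv.2 1 0] := by
            rw [bstep_eq, hr]
            show (match PySem.Dict.get? acc g' with
                  | some a => PySem.Dict.insert acc g'
                      [min (PySem.List.pyGetD a 0 0) (PySem.List.pyGetD kv.2 0 0),
                       max (PySem.List.pyGetD a 1 0) (PySem.List.pyGetD kv.2 1 0)]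
                  | none => PySem.Dict.insert acc g' [PySem.List.pyGetD kv.2 0 0, PySem.List.pyGetD kv.2 1 0]) = _
            rw [ha]
          rw [hstep, PySem.Dict.get?_insert_self]
          rfl
        | some a =>
          have hstep : mergeDirBStep acc kv
              = PySem.Dict.insert acc g'
                  [min (PySem.List.pyGetD a 0 0) (PySem.List.pyGetD kv.2 0 0),
                   max (PySem.List.pyGetD a 1 0) (PySem.List.pyGetD kv.2 1 0)] := by
            rw [bstep_eq, hr]
            show (match PySem.Dict.get? acc g' with
                  | some a => PySem.Dict.insert acc g'
                      [min (PySem.List.pyGetD a 0 0) (PySem.List.pyGetD kv.2 0 0),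
                       max (PySem.List.pyGetD a 1 0) (PySem.List.pyGetD kv.2 1 0)]
                  | none => PySem.Dict.insert acc g' [PySem.List.pyGetD kv.2 0 0, PySem.List.pyGetD kv.2 1 0]) = _
            rw [ha]
          rw [hstep, PySem.Dict.get?_insert_self]
          rfl
      · rw [show ((some g' == some g) : Bool) = false from by simp [hg]]
        simp only [Bool.false_eq_true, if_false]
        have hstep : PySem.Dict.get? (mergeDirBStep acc kv) g = PySem.Dict.get? acc g := by
          cases ha : PySem.Dict.get? acc g' with
          | none =>
            have hs : mergeDirBStep acc kv
                = PySem.Dict.insert acc g' [PySem.List.pyGetD kv.2 0 0, PySem.List.pyGetD kv.2 1 0] := by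
              rw [bstep_eq, hr]
              show (match PySem.Dict.get? acc g' with
                    | some a => PySem.Dict.insert acc g'
                        [min (PySem.List.pyGetD a 0 0) (PySem.List.pyGetD kv.2 0 0),
                         max (PySem.List.pyGetD a 1 0) (PySem.List.pyGetD kv.2 1 0)]
                    | none => PySem.Dict.insert acc g' [PySem.List.pyGetD kv.2 0 0, PySem.List.pyGetD kv.2 1 0]) = _
              rw [ha]
            rw [hs, PySem.Dict.get?_insert_of_ne _ _ (fun e => hg e.symm)]
          | some a =>
            have hs : mergeDirBStep acc kv
                = PySem.Dict.insert acc g'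
                    [min (PySem.List.pyGetD a 0 0) (PySem.List.pyGetD kv.2 0 0),
                     max (PySem.List.pyGetD a 1 0) (PySem.List.pyGetD kv.2 1 0)] := by
              rw [bstep_eq, hr]
              show (match PySem.Dict.get? acc g' with
                    | some a => PySem.Dict.insert acc g'
                        [min (PySem.List.pyGetD a 0 0) (PySem.List.pyGetD kv.2 0 0),
                         max (PySem.List.pyGetD a 1 0) (PySem.List.pyGetD kv.2 1 0)]
                    | none => PySem.Dict.insert acc g' [PySem.List.pyGetD kv.2 0 0, PySem.List.pyGetD kv.2 1 0]) = _
              rw [ha]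
            rw [hs, PySem.Dict.get?_insert_of_ne _ _ (fun e => hg e.symm)]
        rw [ih, hstep]

theorem f0_pair (x y : Int) : pvF0 [x, y] = x := rfl
theorem f1_pair (x y : Int) : pvF1 [x, y] = y := rfl

theorem fold_comb : ∀ (vs : List (List Int)) (a b : Int),
    List.foldl (fun o v => some (pvComb o v)) (some [a, b]) vs =
      some [List.foldl (fun m v => min m (pvF0 v)) a vs, List.foldl (fun M v => max M (pvF1 v)) b vs] := by
  intro vs
  induction vs with
  | nil => intro a b; rfl
  | cons v t ih =>
    intro a b
    rw [List.foldl_cons]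
    have : pvComb (some [a, b]) v = [min a (pvF0 v), max b (pvF1 v)] := by
      simp [pvComb, f0_pair, f1_pair]
    rw [this, ih, List.foldl_cons, List.foldl_cons]

theorem foldl_comb_pairs : ∀ (l : List (String × List Int)) (init : Option (List Int)),
    List.foldl (fun o kv => some (pvComb o kv.2)) init l
      = List.foldl (fun o v => some (pvComb o v)) init (l.map Prod.snd) := by
  intro l
  induction l with
  | nil => intro _; rfl
  | cons kv t ih => intro init; rw [List.map_cons, List.foldl_cons, List.foldl_cons]; exact ih _

theorem group_val (items : List (String × List Int)) (hnd : (items.map Prod.fst).Nodup)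
    {q : String × List String} (hq : q ∈ toMergeA) :
    PySem.Dict.get? (List.foldl mergeDirBStep PySem.Dict.empty items) q.1 =
      if pvPresent (PySem.Dict.mk items) q.2 = [] then none
      else some (pvMval (PySem.Dict.mk items) q.2) := by
  have hsnd : q.2.Nodup := tm_sub_nodup q hq
  rw [acc_spec]
  have hfeq : items.filter (fun kv => PySem.Dict.get? revB kv.1 == some q.1)
      = items.filter (fun kv => decide (kv.1 ∈ q.2)) := by
    apply List.filter_congr
    intro kv _
    by_cases h : kv.1 ∈ q.2 <;> simp [h, (rev_some_iff hq kv.1)]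
  rw [hfeq, foldl_comb_pairs]
  have hperm := gvals_perm items hnd q.2 hsnd
  cases hR : (items.filter (fun kv => decide (kv.1 ∈ q.2))).map Prod.snd with
  | nil =>
    rw [hR] at hperm
    have hpres : pvPresent (PySem.Dict.mk items) q.2 = [] :=
      List.map_eq_nil_iff.1 (List.Perm.eq_nil hperm)
    rw [if_pos hpres]
    rfl
  | cons v vs =>
    rw [hR] at hperm
    have hpresne : pvPresent (PySem.Dict.mk items) q.2 ≠ [] := by
      intro h0
      rw [h0] at hperm
      exact absurd (List.Perm.nil_eq hperm) (by simp)
    rw [if_neg hpresne, List.foldl_cons]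
    rw [show (some (pvComb (PySem.Dict.get? PySem.Dict.empty q.1) v)) = some [pvF0 v, pvF1 v] from rfl, fold_comb]
    obtain ⟨k, ks, hp⟩ : ∃ k ks, pvPresent (PySem.Dict.mk items) q.2 = k :: ks := by
      cases hpp : pvPresent (PySem.Dict.mk items) q.2 with
      | nil => exact absurd hpp hpresne
      | cons a b => exact ⟨a, b, rfl⟩
    rw [hp] at hperm
    have hperm0 : ((k :: ks).map (fun k => pvF0 (PySem.Dict.getD (PySem.Dict.mk items) k []))).Perm
        ((v :: vs).map pvF0) := by
      have := hperm.map pvF0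
      simpa [List.map_map] using this
    have hperm1 : ((k :: ks).map (fun k => pvF1 (PySem.Dict.getD (PySem.Dict.mk items) k []))).Perm
        ((v :: vs).map pvF1) := by
      have := hperm.map pvF1
      simpa [List.map_map] using this
    have e0 : (PySem.List.min? ((k :: ks).map (fun k => PySem.List.pyGetD (PySem.Dict.getD (PySem.Dict.mk items) k []) 0 0)) (fun y => y))
        = some (List.foldl min (pvF0 v) (vs.map pvF0)) := by
      rw [show ((k :: ks).map (fun k => PySem.List.pyGetD (PySem.Dict.getD (PySem.Dict.mk items) k []) 0 0))
            = ((k :: ks).map (fun k => pvF0 (PySem.Dict.getD (PySem.Dict.mk items) k []))) from rfl,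
          min?_perm hperm0,
          show ((v :: vs).map pvF0) = (pvF0 v :: vs.map pvF0) from rfl]
      exact PySem.List.min?_id_cons _ _
    have e1 : (PySem.List.max? ((k :: ks).map (fun k => PySem.List.pyGetD (PySem.Dict.getD (PySem.Dict.mk items) k []) 1 0)) (fun y => y))
        = some (List.foldl max (pvF1 v) (vs.map pvF1)) := by
      rw [show ((k :: ks).map (fun k => PySem.List.pyGetD (PySem.Dict.getD (PySem.Dict.mk items) k []) 1 0))
            = ((k :: ks).map (fun k => pvF1 (PySem.Dict.getD (PySem.Dict.mk items) k []))) from rfl,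
          max?_perm hperm1,
          show ((v :: vs).map pvF1) = (pvF1 v :: vs.map pvF1) from rfl]
      exact PySem.List.max?_id_cons _ _
    simp only [pvMval, hp, e0, e1]
    simp [List.foldl_map]

theorem afold_spec : ∀ (gs : List (String × List String)) (d d₁ m : PySem.Dict String (List Int)),
    (∀ q ∈ gs, ∀ k ∈ q.2, PySem.Dict.get? d₁ k = PySem.Dict.get? d k) →
    gs.Pairwise (fun a b => ∀ k ∈ a.2, k ∉ b.2) →
    List.foldl mergeDirAStep (d₁, m) gs =
      (PySem.Dict.mk (d₁.items.filter (fun kv => !decide (∃ q ∈ gs, kv.1 ∈ q.2))),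
       List.foldl (fun m q => if pvPresent d q.2 = [] then m
                              else PySem.Dict.insert m q.1 (pvMval d q.2)) m gs) := by
  intro gs
  induction gs with
  | nil =>
    intro d d₁ m _ _
    simp
  | cons q rest ih =>
    intro d d₁ m hsub hdisj
    rcases List.pairwise_cons.1 hdisj with ⟨hhead, htail⟩
    have hq0 : q ∈ q :: rest := List.mem_cons_self
    have hconts : ∀ k ∈ q.2, PySem.Dict.contains d₁ k = PySem.Dict.contains d k := by
      intro k hk
      rw [PySem.Dict.contains_eq_isSome_get?, PySem.Dict.contains_eq_isSome_get?,
          hsub q hq0 k hk]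
    have hpres : q.2.filter (fun k => PySem.Dict.contains d₁ k) = pvPresent d q.2 :=
      List.filter_congr (fun k hk => hconts k hk)
    have hmemkeys : ∀ kv ∈ d₁.items, PySem.Dict.contains d₁ kv.1 = true := by
      intro kv hkv
      exact (PySem.Dict.contains_iff_mem_keys d₁ kv.1).2 (List.mem_map_of_mem hkv)
    have hiffpres : ∀ kv ∈ d₁.items, (kv.1 ∈ q.2 ↔ kv.1 ∈ pvPresent d q.2) := by
      intro kv hkv
      constructor
      · intro hin
        exact List.mem_filter.2 ⟨hin, by rw [← hconts kv.1 hin]; exact hmemkeys kv hkv⟩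
      · intro hin
        exact (List.mem_filter.1 hin).1
    rw [List.foldl_cons, List.foldl_cons]
    by_cases hempty : pvPresent d q.2 = []
    · have hstep : mergeDirAStep (d₁, m) q = (d₁, m) := by
        simp only [mergeDirAStep]
        rw [hpres, hempty]
        rfl
      rw [hstep, if_pos hempty,
          ih d d₁ m (fun q' hq' => hsub q' (List.mem_cons_of_mem _ hq')) htail]
      congr 1
      congr 1
      apply List.filter_congr
      intro kv hkv
      have hnq : kv.1 ∉ q.2 := by
        intro hin
        have := (hiffpres kv hkv).1 hin
        rw [hempty] at this
        cases this
      simp [List.mem_cons, exists_eq_or_imp, hnq]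
    · have hmap0 : (pvPresent d q.2).map (fun k => PySem.List.pyGetD (PySem.Dict.getD d₁ k []) 0 0)
          = (pvPresent d q.2).map (fun k => PySem.List.pyGetD (PySem.Dict.getD d k []) 0 0) := by
        apply List.map_congr_left
        intro k hk
        have := hsub q hq0 k (List.mem_filter.1 hk).1
        rw [PySem.Dict.getD, PySem.Dict.getD, this]
      have hmap1 : (pvPresent d q.2).map (fun k => PySem.List.pyGetD (PySem.Dict.getD d₁ k []) 1 0)
          = (pvPresent d q.2).map (fun k => PySem.List.pyGetD (PySem.Dict.getD d k []) 1 0) := by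
        apply List.map_congr_left
        intro k hk
        have := hsub q hq0 k (List.mem_filter.1 hk).1
        rw [PySem.Dict.getD, PySem.Dict.getD, this]
      have hstep : mergeDirAStep (d₁, m) q =
          (List.foldl (fun d k => PySem.Dict.erase d k) d₁ (pvPresent d q.2),
           PySem.Dict.insert m q.1 (pvMval d q.2)) := by
        simp only [mergeDirAStep]
        rw [hpres]
        rw [if_neg (by simpa [List.isEmpty_iff] using hempty)]
        rw [hmap0, hmap1]
        rfl
      rw [hstep, if_neg hempty]
      have hd2 : (List.foldl (fun d k => PySem.Dict.erase d k) d₁ (pvPresent d q.2))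
          = PySem.Dict.mk (d₁.items.filter (fun kv => !decide (kv.1 ∈ pvPresent d q.2))) :=
        PySem.Dict.ext (foldl_erase_items _ _)
      have hd2get : ∀ q' ∈ rest, ∀ k ∈ q'.2,
          PySem.Dict.get? (List.foldl (fun d k => PySem.Dict.erase d k) d₁ (pvPresent d q.2)) k
            = PySem.Dict.get? d k := by
        intro q' hq' k hk
        have hkP : ∀ v : List Int, (!decide ((k, v).1 ∈ pvPresent d q.2)) = true := by
          intro v
          simp only [Bool.not_eq_true', decide_eq_false_iff_not]
          intro hkp
          exact hhead q' hq' k (List.mem_filter.1 hkp).1 hk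
        rw [hd2, get?_mk_filter _ _ _ hkP]
        exact hsub q' (List.mem_cons_of_mem _ hq') k hk
      rw [ih d _ _ hd2get htail]
      congr 1
      congr 1
      rw [hd2]
      show (d₁.items.filter _).filter _ = _
      rw [List.filter_filter]
      apply List.filter_congr
      intro kv hkv
      by_cases h1 : kv.1 ∈ pvPresent d q.2 <;>
        by_cases h2 : ∃ q' ∈ rest, kv.1 ∈ q'.2 <;>
          simp [List.mem_cons, exists_eq_or_imp, h1, h2, (hiffpres kv hkv)]

theorem items_groupfold (d : PySem.Dict String (List Int)) :
    ∀ (gs : List (String × List String)) (m : PySem.Dict String (List Int)),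
    (gs.map Prod.fst).Nodup →
    (∀ q ∈ gs, PySem.Dict.contains m q.1 = false) →
    (List.foldl (fun m q => if pvPresent d q.2 = [] then m
                            else PySem.Dict.insert m q.1 (pvMval d q.2)) m gs).items
      = m.items ++ gs.filterMap (fun q => if pvPresent d q.2 = [] then none
                                          else some (q.1, pvMval d q.2)) := by
  intro gs
  induction gs with
  | nil => intro m _ _; simp
  | cons q rest ih =>
    intro m hnodup hfresh
    simp only [List.map_cons, List.nodup_cons] at hnodup
    rw [List.foldl_cons, List.filterMap_cons]
    by_cases hp : pvPresent d q.2 = []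
    · rw [if_pos hp, if_pos hp]
      exact ih m hnodup.2 (fun q' hq' => hfresh q' (List.mem_cons_of_mem _ hq'))
    · rw [if_neg hp, if_neg hp]
      have hfresh' : ∀ q' ∈ rest, PySem.Dict.contains (PySem.Dict.insert m q.1 (pvMval d q.2)) q'.1 = false := by
        intro q' hq'
        rw [PySem.Dict.contains_insert]
        have hne : q'.1 ≠ q.1 := by
          intro e
          exact hnodup.1 (e ▸ List.mem_map_of_mem (f := Prod.fst) hq')
        simp [hne, hfresh q' (List.mem_cons_of_mem _ hq')]
      rw [ih _ hnodup.2 hfresh',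
          PySem.Dict.items_insert_of_not_contains _ _ (hfresh q List.mem_cons_self)]
      simp

theorem foldl_insert_filterMap (f : (String × List String) → Option (String × List Int)) :
    ∀ (gs : List (String × List String)) (d0 : PySem.Dict String (List Int)),
    List.foldl (fun acc p => acc.insert p.1 p.2) d0 (gs.filterMap f)
      = List.foldl (fun acc q => match f q with
                                 | none => acc
                                 | some p => acc.insert p.1 p.2) d0 gs := by
  intro gs
  induction gs with
  | nil => intro d0; rfl
  | cons q t ih =>
    intro d0
    rw [List.filterMap_cons]
    cases hf : f q with
    | none => rw [List.foldl_cons, hf]; exact ih d0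
    | some p => rw [List.foldl_cons, List.foldl_cons, hf]; exact ih _

theorem ofList_eq_mk (l : List (String × List Int)) (h : (l.map Prod.fst).Nodup) :
    PySem.Dict.ofList l = PySem.Dict.mk l := by
  apply PySem.Dict.ext
  show (List.foldl (fun acc p => acc.insert p.1 p.2) PySem.Dict.empty l).items = l
  rw [PySem.Dict.items_foldl_insert_fresh l Prod.fst Prod.snd PySem.Dict.empty
        (fun a _ => rfl) h]
  rw [show PySem.Dict.empty.items = ([] : List (String × List Int)) from rfl]
  simp

def pvStepA (d : PySem.Dict String (List Int)) (acc : PySem.Dict String (List Int)) (g : String) :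
    PySem.Dict String (List Int) :=
  if pvPresent d (pvSubsOf g) = [] then acc else PySem.Dict.insert acc g (pvMval d (pvSubsOf g))

def pvStepB (accD : PySem.Dict String (List Int)) (out : PySem.Dict String (List Int)) (g : String) :
    PySem.Dict String (List Int) :=
  match PySem.Dict.get? accD g with
  | some a => PySem.Dict.insert out g a
  | none => out

theorem merge_fields_dir_eq (items : List (String × List Int))
    (hnd : (items.map Prod.fst).Nodup) :
    mergeDirA (PySem.Dict.mk items) = mergeDirB (PySem.Dict.mk items) := by
  have hkeepnd : (((PySem.Dict.mk items).items.filter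
      (fun kv => !decide (∃ q ∈ toMergeA, kv.1 ∈ q.2))).map Prod.fst).Nodup :=
    List.Nodup.sublist (List.Sublist.map Prod.fst List.filter_sublist) hnd
  have hA : mergeDirA (PySem.Dict.mk items)
      = List.foldl (fun acc q => if pvPresent (PySem.Dict.mk items) q.2 = [] then acc
                                 else PySem.Dict.insert acc q.1 (pvMval (PySem.Dict.mk items) q.2))
          (PySem.Dict.mk ((PySem.Dict.mk items).items.filter
            (fun kv => !decide (∃ q ∈ toMergeA, kv.1 ∈ q.2))))
          toMergeA := by
    show PySem.Dict.update (List.foldl mergeDirAStep (PySem.Dict.mk items, PySem.Dict.empty) toMergeA).1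
          (List.foldl mergeDirAStep (PySem.Dict.mk items, PySem.Dict.empty) toMergeA).2.items = _
    rw [afold_spec toMergeA (PySem.Dict.mk items) (PySem.Dict.mk items) PySem.Dict.empty
          (fun _ _ _ _ => rfl) tm_disj]
    show PySem.Dict.update _ (List.foldl _ PySem.Dict.empty toMergeA).items = _
    rw [items_groupfold (PySem.Dict.mk items) toMergeA PySem.Dict.empty tm_fst_nodup (fun q _ => rfl)]
    rw [show PySem.Dict.empty.items = ([] : List (String × List Int)) from rfl, List.nil_append]
    show List.foldl (fun (acc : PySem.Dict String (List Int)) (p : String × List Int) => acc.insert p.1 p.2) _ _ = _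
    rw [foldl_insert_filterMap]
    apply PySem.List.foldl_congr_mem
    intro acc q _
    by_cases hc : pvPresent (PySem.Dict.mk items) q.2 = [] <;> simp [hc]
  have hA2 : List.foldl (fun acc q => if pvPresent (PySem.Dict.mk items) q.2 = [] then acc
                                      else PySem.Dict.insert acc q.1 (pvMval (PySem.Dict.mk items) q.2))
          (PySem.Dict.mk ((PySem.Dict.mk items).items.filter
            (fun kv => !decide (∃ q ∈ toMergeA, kv.1 ∈ q.2))))
          toMergeA
      = List.foldl (fun acc q => pvStepA (PySem.Dict.mk items) acc q.1)
          (PySem.Dict.mk ((PySem.Dict.mk items).items.filter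
            (fun kv => !decide (∃ q ∈ toMergeA, kv.1 ∈ q.2))))
          toMergeA := by
    apply PySem.List.foldl_congr_mem
    intro acc q hq
    simp only [pvStepA, subsOf_eq q hq]
  have hBkeep : PySem.Dict.ofList ((PySem.Dict.mk items).items.filter
        (fun kv => !(PySem.Dict.contains revB kv.1)))
      = PySem.Dict.mk ((PySem.Dict.mk items).items.filter
        (fun kv => !decide (∃ q ∈ toMergeA, kv.1 ∈ q.2))) := by
    have hfe : (PySem.Dict.mk items).items.filter (fun kv => !(PySem.Dict.contains revB kv.1))
        = (PySem.Dict.mk items).items.filter (fun kv => !decide (∃ q ∈ toMergeA, kv.1 ∈ q.2)) :=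
      List.filter_congr (fun kv _ => by rw [contains_rev])
    rw [hfe]
    exact ofList_eq_mk _ hkeepnd
  have hB : mergeDirB (PySem.Dict.mk items)
      = List.foldl (fun out q => pvStepB (List.foldl mergeDirBStep PySem.Dict.empty items) out q.1)
          (PySem.Dict.mk ((PySem.Dict.mk items).items.filter
            (fun kv => !decide (∃ q ∈ toMergeA, kv.1 ∈ q.2))))
          groupSizesB := by
    show List.foldl (fun out q => pvStepB (List.foldl mergeDirBStep PySem.Dict.empty items) out q.1)
          (PySem.Dict.ofList ((PySem.Dict.mk items).items.filter
            (fun kv => !(PySem.Dict.contains revB kv.1))))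
          groupSizesB = _
    rw [hBkeep]
  rw [hA, hA2, hB]
  rw [show List.foldl (fun acc q => pvStepA (PySem.Dict.mk items) acc q.1)
          (PySem.Dict.mk ((PySem.Dict.mk items).items.filter
            (fun kv => !decide (∃ q ∈ toMergeA, kv.1 ∈ q.2))))
          toMergeA
        = List.foldl (pvStepA (PySem.Dict.mk items))
            (PySem.Dict.mk ((PySem.Dict.mk items).items.filter
              (fun kv => !decide (∃ q ∈ toMergeA, kv.1 ∈ q.2))))
            (toMergeA.map Prod.fst) from (List.foldl_map).symm]
  rw [show List.foldl (fun out q => pvStepB (List.foldl mergeDirBStep PySem.Dict.empty items) out q.1)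
          (PySem.Dict.mk ((PySem.Dict.mk items).items.filter
            (fun kv => !decide (∃ q ∈ toMergeA, kv.1 ∈ q.2))))
          groupSizesB
        = List.foldl (pvStepB (List.foldl mergeDirBStep PySem.Dict.empty items))
            (PySem.Dict.mk ((PySem.Dict.mk items).items.filter
              (fun kv => !decide (∃ q ∈ toMergeA, kv.1 ∈ q.2))))
            (groupSizesB.map Prod.fst) from (List.foldl_map).symm]
  rw [names_eq]
  apply PySem.List.foldl_congr_mem
  intro out g hg
  rcases List.mem_map.1 hg with ⟨q, hq, rfl⟩
  simp only [pvStepA, pvStepB, group_val items hnd hq]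
  by_cases hc : pvPresent (PySem.Dict.mk items) q.2 = [] <;> simp [hc, subsOf_eq q hq]

theorem merge_fields_instr_eq (instr : List (String × List (String × List Int)))
    (hp : ∀ q ∈ instr, (q.1 = "MOSI" ∨ q.1 = "MISO") → (q.2.map Prod.fst).Nodup) :
    mergeInstrA instr = mergeInstrB instr := by
  unfold mergeInstrA mergeInstrB
  simp only [List.foldl_cons, List.foldl_nil]
  cases h1 : PySem.Dict.get? (PySem.Dict.mk instr) "MOSI" with
  | none =>
    cases h2 : PySem.Dict.get? (PySem.Dict.mk instr) "MISO" with
    | none => rfl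
    | some dd2 =>
      show PySem.Dict.items (PySem.Dict.insert (PySem.Dict.mk instr) "MISO" (mergeDirA (PySem.Dict.mk dd2)).items)
          = PySem.Dict.items (PySem.Dict.insert (PySem.Dict.mk instr) "MISO" (mergeDirB (PySem.Dict.mk dd2)).items)
      have hmem : ("MISO", dd2) ∈ instr := PySem.Dict.mem_items_of_get?_eq_some _ h2
      rw [merge_fields_dir_eq dd2 (hp _ hmem (Or.inr rfl))]
  | some dd =>
    show PySem.Dict.items (match PySem.Dict.get? (PySem.Dict.insert (PySem.Dict.mk instr) "MOSI" (mergeDirA (PySem.Dict.mk dd)).items) "MISO" with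
          | some dd2 => PySem.Dict.insert (PySem.Dict.insert (PySem.Dict.mk instr) "MOSI" (mergeDirA (PySem.Dict.mk dd)).items) "MISO" (mergeDirA (PySem.Dict.mk dd2)).items
          | none => PySem.Dict.insert (PySem.Dict.mk instr) "MOSI" (mergeDirA (PySem.Dict.mk dd)).items)
        = PySem.Dict.items (match PySem.Dict.get? (PySem.Dict.insert (PySem.Dict.mk instr) "MOSI" (mergeDirB (PySem.Dict.mk dd)).items) "MISO" with
          | some dd2 => PySem.Dict.insert (PySem.Dict.insert (PySem.Dict.mk instr) "MOSI" (mergeDirB (PySem.Dict.mk dd)).items) "MISO" (mergeDirB (PySem.Dict.mk dd2)).items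
          | none => PySem.Dict.insert (PySem.Dict.mk instr) "MOSI" (mergeDirB (PySem.Dict.mk dd)).items)
    have hmem : ("MOSI", dd) ∈ instr := PySem.Dict.mem_items_of_get?_eq_some _ h1
    rw [merge_fields_dir_eq dd (hp _ hmem (Or.inl rfl))]
    rw [PySem.Dict.get?_insert_of_ne _ _ (show ("MISO" : String) ≠ "MOSI" by decide)]
    cases h2 : PySem.Dict.get? (PySem.Dict.mk instr) "MISO" with
    | none => rfl
    | some dd2 =>
      show PySem.Dict.items (PySem.Dict.insert _ "MISO" (mergeDirA (PySem.Dict.mk dd2)).items)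
          = PySem.Dict.items (PySem.Dict.insert _ "MISO" (mergeDirB (PySem.Dict.mk dd2)).items)
      have hmem2 : ("MISO", dd2) ∈ instr := PySem.Dict.mem_items_of_get?_eq_some _ h2
      rw [merge_fields_dir_eq dd2 (hp _ hmem2 (Or.inr rfl))]

-- ===== VERDICT (by name: the statement is the Claim_ definition above) =====
theorem merge_fields_spec : Claim_equal_merge_fields := by
  intro data _ hpre
  unfold Spec_merge_fields merge_fields merge_fields_alt
  apply List.map_congr_left
  intro p hpmem
  have : mergeInstrA p.2 = mergeInstrB p.2 := by
    apply merge_fields_instr_eq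
    intro q hq hdir
    exact (hpre p hpmem q hq hdir).1
  rw [this]
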